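-- pv_equiv track=rewrite | github.com/yazid-hoblos/PULkit | tmp/transferred/PANORAMA/panorama/compare/context.py | create_metanodes
-- ===== SOURCE A (Python) =====
-- from typing import Dict, Tuple, Union
-- from typing import Dict, Union, List, Set, Iterator
-- from itertools import product
-- from collections import defaultdict
--
-- def create_metanodes(gfA_to_cf: dict, gfB_to_cf: dict) -> Tuple[List[Tuple[str, dict]], dict, dict]:
--     """
--     Create metanodes for a multigraph based on gene family mappings.
--
--     :param gfA_to_cf: A dictionary mapping gene families in graph A to their cluster families.
--     :param gfB_to_cf: A dictionary mapping gene families in graph B to their cluster families.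
--     :return: A tuple containing the metanodes, graph A node to metanodes mapping, and graph B node to metanodes mapping.
--
--     Metanodes are created for gene families that have a common cluster family between the two graphs.
--
--     When a cluster family is associated with more than one gene family in a graph, multiple metanodes are created,
--     and each metanode is differentiated by adding "´" to its name.
--     """
--
--     clusters = set(gfB_to_cf.values()) | set(gfA_to_cf.values())
--
--     meta_nodes = {}
--
--     gA_node_2_meta_nodes = defaultdict(list)
--     gB_node_2_meta_nodes = defaultdict(list)
--
--     for cluster in clusters:
--         clstr_gA_nodes = [n for n in gfA_to_cf if gfA_to_cf[n] == cluster]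
--         clstr_gB_nodes = [n for n in gfB_to_cf if gfB_to_cf[n] == cluster]
--
--         for i, (n_gA, n_gB) in enumerate(product(clstr_gA_nodes, clstr_gB_nodes)):
--             full_name_meta_node = f"{cluster}: ({n_gB}, {n_gA})"
--
--             meta_node = f"{cluster}" if i == 0 else f"{cluster}{'´' * i}"
--
--             meta_node_attr = {"cluster": cluster, "node_gA": n_gA, "node_gB": n_gB, 'full_name': full_name_meta_node}
--             meta_nodes[meta_node] = meta_node_attr
--             gA_node_2_meta_nodes[n_gA].append(meta_node)
--             gB_node_2_meta_nodes[n_gB].append(meta_node)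
--
--     return meta_nodes, gA_node_2_meta_nodes, gB_node_2_meta_nodes
-- ===== SOURCE B (Python) =====
-- from collections import defaultdict
--
--
-- def create_metanodes(gfA_to_cf: dict, gfB_to_cf: dict):
--     # One pass over each input to group gene families by cluster family,
--     # then one pass over the distinct clusters with direct lookups.
--     cf_to_gfA = defaultdict(list)
--     for n, cf in gfA_to_cf.items():
--         cf_to_gfA[cf].append(n)
--     cf_to_gfB = defaultdict(list)
--     for n, cf in gfB_to_cf.items():
--         cf_to_gfB[cf].append(n)
--
--     clusters = dict.fromkeys(list(gfB_to_cf.values()) + list(gfA_to_cf.values()))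
--
--     meta_nodes = {}
--     gA_node_2_meta_nodes = defaultdict(list)
--     gB_node_2_meta_nodes = defaultdict(list)
--
--     for cluster in clusters:
--         i = 0
--         for n_gA in cf_to_gfA.get(cluster, []):
--             for n_gB in cf_to_gfB.get(cluster, []):
--                 meta_node = cluster + "´" * i
--                 meta_nodes[meta_node] = {
--                     "cluster": cluster,
--                     "node_gA": n_gA,
--                     "node_gB": n_gB,
--                     "full_name": f"{cluster}: ({n_gB}, {n_gA})",
--                 }
--                 gA_node_2_meta_nodes[n_gA].append(meta_node)
--                 gB_node_2_meta_nodes[n_gB].append(meta_node)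
--                 i += 1
--
--     return meta_nodes, gA_node_2_meta_nodes, gB_node_2_meta_nodes
-- ===== Notes on version B (the rewrite author's own statement) =====
-- stated objective: alternative
-- what changed: Instead of rescanning both whole dicts for every cluster, B groups gene families by cluster family in one pass per dict (defaultdict of lists) and then iterates the distinct clusters with direct lookups; on inputs with many large shared clusters the quadratic output itself dominates both programs.
import Mathlib
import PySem

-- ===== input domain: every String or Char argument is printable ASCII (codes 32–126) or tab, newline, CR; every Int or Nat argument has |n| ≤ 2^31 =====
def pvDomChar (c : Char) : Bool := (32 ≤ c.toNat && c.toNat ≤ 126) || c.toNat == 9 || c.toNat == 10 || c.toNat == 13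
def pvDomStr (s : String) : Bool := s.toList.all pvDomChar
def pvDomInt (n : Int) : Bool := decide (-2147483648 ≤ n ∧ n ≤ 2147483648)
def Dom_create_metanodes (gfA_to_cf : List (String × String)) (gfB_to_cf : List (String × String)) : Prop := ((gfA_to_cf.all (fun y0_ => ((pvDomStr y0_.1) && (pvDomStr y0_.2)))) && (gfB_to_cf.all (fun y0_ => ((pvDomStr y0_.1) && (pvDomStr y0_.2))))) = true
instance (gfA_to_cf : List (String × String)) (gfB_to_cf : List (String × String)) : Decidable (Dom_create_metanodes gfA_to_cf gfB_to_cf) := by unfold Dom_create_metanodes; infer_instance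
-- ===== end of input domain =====

-- ===== PORT A =====
-- B replaces A's per-cluster rescans of both dicts by a single grouping pass per dict (objective: alternative); return-value equivalence is proved here.
def pvStep_A (gfA_to_cf : List (String × String)) (gfB_to_cf : List (String × String))
    (st : PySem.Dict String (List (String × String)) × PySem.Dict String (List String) × PySem.Dict String (List String))
    (cluster : String) :
    PySem.Dict String (List (String × String)) × PySem.Dict String (List String) × PySem.Dict String (List String) :=
  let dA : PySem.Dict String String := ⟨gfA_to_cf⟩
  let dB : PySem.Dict String String := ⟨gfB_to_cf⟩
  let clstr_gA_nodes := dA.keys.filter (fun n => dA.get? n == some cluster)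
  let clstr_gB_nodes := dB.keys.filter (fun n => dB.get? n == some cluster)
  -- itertools.product of two lists, in product order (hand port: exact)
  let pairs := clstr_gA_nodes.flatMap (fun n_gA => clstr_gB_nodes.map (fun n_gB => (n_gA, n_gB)))
  (PySem.List.enumerate pairs 0).foldl (fun st p =>
    let i := p.1
    let n_gA := p.2.1
    let n_gB := p.2.2
    let full_name := cluster ++ ": (" ++ n_gB ++ ", " ++ n_gA ++ ")"
    -- "´" * i on the nonnegative enumerate index (hand port: exact for 0 ≤ i)
    let meta_node := if i == 0 then cluster else cluster ++ String.ofList (List.replicate i.toNat '´')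
    (st.1.insert meta_node
        [("cluster", cluster), ("node_gA", n_gA), ("node_gB", n_gB), ("full_name", full_name)],
     st.2.1.modify n_gA [] (· ++ [meta_node]),
     st.2.2.modify n_gB [] (· ++ [meta_node]))) st

def create_metanodes (gfA_to_cf : List (String × String)) (gfB_to_cf : List (String × String)) : (List (String × List (String × String))) × (List (String × List String)) × (List (String × List String)) :=
  let dA : PySem.Dict String String := ⟨gfA_to_cf⟩
  let dB : PySem.Dict String String := ⟨gfB_to_cf⟩
  let clusters : PySem.Set String := PySem.Set.union (PySem.Set.ofList dB.values) dA.values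
  let res := clusters.foldl (pvStep_A gfA_to_cf gfB_to_cf) (PySem.Dict.empty, PySem.Dict.empty, PySem.Dict.empty)
  (res.1.items, res.2.1.items, res.2.2.items)


-- ===== PORT B =====
def pvStep_B (byA byB : PySem.Dict String (List String))
    (st : PySem.Dict String (List (String × String)) × PySem.Dict String (List String) × PySem.Dict String (List String))
    (cluster : String) :
    PySem.Dict String (List (String × String)) × PySem.Dict String (List String) × PySem.Dict String (List String) :=
  ((byA.getD cluster []).foldl (fun si n_gA =>
    (byB.getD cluster []).foldl (fun si n_gB =>
      let i := si.2
      let meta_node := cluster ++ String.ofList (List.replicate i.toNat '´')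
      let full_name := cluster ++ ": (" ++ n_gB ++ ", " ++ n_gA ++ ")"
      ((si.1.1.insert meta_node
          [("cluster", cluster), ("node_gA", n_gA), ("node_gB", n_gB), ("full_name", full_name)],
        si.1.2.1.modify n_gA [] (· ++ [meta_node]),
        si.1.2.2.modify n_gB [] (· ++ [meta_node])), i + 1)) si)
    (st, (0 : Int))).1

def create_metanodes_alt (gfA_to_cf : List (String × String)) (gfB_to_cf : List (String × String)) : (List (String × List (String × String))) × (List (String × List String)) × (List (String × List String)) :=
  let byA := gfA_to_cf.foldl (fun (d : PySem.Dict String (List String)) p => d.modify p.2 [] (· ++ [p.1])) PySem.Dict.empty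
  let byB := gfB_to_cf.foldl (fun (d : PySem.Dict String (List String)) p => d.modify p.2 [] (· ++ [p.1])) PySem.Dict.empty
  -- dict.fromkeys(list(B.values()) + list(A.values())) — ordered dedup
  let clusters := PySem.List.dedup ((⟨gfB_to_cf⟩ : PySem.Dict String String).values ++ (⟨gfA_to_cf⟩ : PySem.Dict String String).values)
  let res := clusters.foldl (pvStep_B byA byB) (PySem.Dict.empty, PySem.Dict.empty, PySem.Dict.empty)
  (res.1.items, res.2.1.items, res.2.2.items)


-- ===== PRECONDITION & SPEC =====
-- Pre_ requires distinct keys in each association list: a Python dict cannot carry duplicate keys,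
-- so duplicate-key lists represent no Python input at all.
def Pre_create_metanodes (gfA_to_cf : List (String × String)) (gfB_to_cf : List (String × String)) : Prop :=
  (gfA_to_cf.map Prod.fst).Nodup ∧ (gfB_to_cf.map Prod.fst).Nodup
instance (gfA_to_cf : List (String × String)) (gfB_to_cf : List (String × String)) : Decidable (Pre_create_metanodes gfA_to_cf gfB_to_cf) := by unfold Pre_create_metanodes; infer_instance
def pvWitness_create_metanodes : (List (String × String)) × (List (String × String)) :=
  ([("fam1", "c1"), ("fam2", "c2")], [("fam3", "c1")])
def Spec_create_metanodes (gfA_to_cf : List (String × String)) (gfB_to_cf : List (String × String)) (out : (List (String × List (String × String))) × (List (String × List String)) × (List (String × List String))) : Prop := out = create_metanodes_alt gfA_to_cf gfB_to_cf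
instance (gfA_to_cf : List (String × String)) (gfB_to_cf : List (String × String)) (out : (List (String × List (String × String))) × (List (String × List String)) × (List (String × List String))) : Decidable (Spec_create_metanodes gfA_to_cf gfB_to_cf out) := by unfold Spec_create_metanodes; infer_instance

-- ===== CLAIM (what is proved, stated in full; the proofs are below) =====
def Claim_equal_create_metanodes : Prop := ∀ (gfA_to_cf : List (String × String)) (gfB_to_cf : List (String × String)), Dom_create_metanodes gfA_to_cf gfB_to_cf → Pre_create_metanodes gfA_to_cf gfB_to_cf → Spec_create_metanodes gfA_to_cf gfB_to_cf (create_metanodes gfA_to_cf gfB_to_cf)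

-- ===== LEMMAS AND PROOFS =====

theorem pv_keyscan (l : List (String × String)) (c : String) (h : (l.map Prod.fst).Nodup) :
    (l.map Prod.fst).filter (fun n => (PySem.Dict.mk l).get? n == some c)
      = (l.filter (fun p => p.2 == c)).map Prod.fst := by
  induction l with
  | nil => simp
  | cons p t ih =>
    obtain ⟨k, v⟩ := p
    simp only [List.map_cons, List.nodup_cons, List.mem_map] at h
    obtain ⟨hk, ht⟩ := h
    have hfilt : (t.map Prod.fst).filter (fun n => (PySem.Dict.mk ((k, v) :: t)).get? n == some c)
        = (t.map Prod.fst).filter (fun n => (PySem.Dict.mk t).get? n == some c) := by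
      apply List.filter_congr
      intro n hn
      have hkn : (k == n) = false := by
        simp only [beq_eq_false_iff_ne]
        rintro rfl
        exact hk (by simpa using hn)
      simp [PySem.Dict.get?_mk_cons, hkn]
    simp only [List.map_cons, List.filter_cons]
    rw [hfilt, ih ht]
    have hself : (PySem.Dict.mk ((k, v) :: t)).get? k = some v := by
      simp [PySem.Dict.get?_mk_cons]
    simp [hself]
    split_ifs <;> simp

theorem pv_group (l : List (String × String)) (c : String) :
    (l.foldl (fun (d : PySem.Dict String (List String)) p => d.modify p.2 [] (· ++ [p.1])) PySem.Dict.empty).getD c []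
      = (l.filter (fun p => p.2 == c)).map Prod.fst := by
  have h : l.foldl (fun (d : PySem.Dict String (List String)) p => d.modify p.2 [] (· ++ [p.1])) PySem.Dict.empty
      = (l.map Prod.swap).foldl (fun (d : PySem.Dict String (List String)) p => d.modify p.1 [] (· ++ [p.2])) PySem.Dict.empty := by
    rw [List.foldl_map]; rfl
  rw [h, PySem.Dict.getD_foldl_modify_append]
  simp [List.filter_map, Function.comp_def]

theorem pv_enum {σ γ : Type} (L : List γ) (g : σ → Int → γ → σ) (st : σ) (i : Int) :
    L.foldl (fun (si : σ × Int) x => (g si.1 si.2 x, si.2 + 1)) (st, i)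
      = ((PySem.List.enumerate L i).foldl (fun s p => g s p.1 p.2) st, i + L.length) := by
  induction L generalizing st i with
  | nil => simp [PySem.List.enumerate_nil]
  | cons x t ih => simp [PySem.List.enumerate_cons, ih]; ring

theorem pv_if_collapse (cluster : String) (i : Int) :
    (if i == 0 then cluster else cluster ++ String.ofList (List.replicate i.toNat '´'))
      = cluster ++ String.ofList (List.replicate i.toNat '´') := by
  by_cases h : i = 0
  · subst h; simp
  · simp [h]

theorem pv_step_eq (gfA_to_cf gfB_to_cf : List (String × String)) (hA : (gfA_to_cf.map Prod.fst).Nodup)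
    (hB : (gfB_to_cf.map Prod.fst).Nodup)
    (st : PySem.Dict String (List (String × String)) × PySem.Dict String (List String) × PySem.Dict String (List String)) (cluster : String) :
    pvStep_A gfA_to_cf gfB_to_cf st cluster
      = pvStep_B (gfA_to_cf.foldl (fun (d : PySem.Dict String (List String)) p => d.modify p.2 [] (· ++ [p.1])) PySem.Dict.empty)
          (gfB_to_cf.foldl (fun (d : PySem.Dict String (List String)) p => d.modify p.2 [] (· ++ [p.1])) PySem.Dict.empty)
          st cluster := by
  simp only [pvStep_A, pvStep_B, pv_group]
  have hkA : (PySem.Dict.keys (⟨gfA_to_cf⟩ : PySem.Dict String String)) = gfA_to_cf.map Prod.fst := rfl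
  have hkB : (PySem.Dict.keys (⟨gfB_to_cf⟩ : PySem.Dict String String)) = gfB_to_cf.map Prod.fst := rfl
  rw [hkA, hkB, pv_keyscan gfA_to_cf cluster hA, pv_keyscan gfB_to_cf cluster hB]
  set As := (gfA_to_cf.filter (fun p => p.2 == cluster)).map Prod.fst with hAs
  set Bs := (gfB_to_cf.filter (fun p => p.2 == cluster)).map Prod.fst with hBs
  have h1 := congrArg Prod.fst (pv_enum (σ := PySem.Dict String (List (String × String)) × PySem.Dict String (List String) × PySem.Dict String (List String))
    (As.flatMap (fun n_gA => Bs.map (fun n_gB => (n_gA, n_gB))))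
    (fun s i x =>
      (s.1.insert (if i == 0 then cluster else cluster ++ String.ofList (List.replicate i.toNat '´'))
          [("cluster", cluster), ("node_gA", x.1), ("node_gB", x.2),
           ("full_name", cluster ++ ": (" ++ x.2 ++ ", " ++ x.1 ++ ")")],
       s.2.1.modify x.1 [] (· ++ [if i == 0 then cluster else cluster ++ String.ofList (List.replicate i.toNat '´')]),
       s.2.2.modify x.2 [] (· ++ [if i == 0 then cluster else cluster ++ String.ofList (List.replicate i.toNat '´')]))) st 0)
  simp only at h1
  rw [← h1, List.foldl_flatMap]
  apply congrArg Prod.fst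
  apply PySem.List.foldl_congr_mem
  intro acc a _
  rw [List.foldl_map]
  apply PySem.List.foldl_congr_mem
  intro acc2 b _
  simp only [pv_if_collapse]

theorem pv_clusters_eq (gfA_to_cf gfB_to_cf : List (String × String)) :
    PySem.Set.union (PySem.Set.ofList ((⟨gfB_to_cf⟩ : PySem.Dict String String).values)) ((⟨gfA_to_cf⟩ : PySem.Dict String String).values)
      = PySem.List.dedup ((⟨gfB_to_cf⟩ : PySem.Dict String String).values ++ (⟨gfA_to_cf⟩ : PySem.Dict String String).values) := by
  rw [PySem.List.dedup_eq_ofList, PySem.Set.ofList_append]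
  rfl

-- ===== VERDICT (by name: the statement is the Claim_ definition above) =====
theorem create_metanodes_spec : Claim_equal_create_metanodes := by
  intro gfA_to_cf gfB_to_cf _hDom hPre
  obtain ⟨hA, hB⟩ := hPre
  unfold Spec_create_metanodes
  simp only [create_metanodes, create_metanodes_alt]
  rw [pv_clusters_eq gfA_to_cf gfB_to_cf]
  have hfold : ∀ (cl : List String),
      cl.foldl (pvStep_A gfA_to_cf gfB_to_cf) (PySem.Dict.empty, PySem.Dict.empty, PySem.Dict.empty)
        = cl.foldl (pvStep_B
            (gfA_to_cf.foldl (fun (d : PySem.Dict String (List String)) p => d.modify p.2 [] (· ++ [p.1])) PySem.Dict.empty)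
            (gfB_to_cf.foldl (fun (d : PySem.Dict String (List String)) p => d.modify p.2 [] (· ++ [p.1])) PySem.Dict.empty))
            (PySem.Dict.empty, PySem.Dict.empty, PySem.Dict.empty) := by
    intro cl
    apply PySem.List.foldl_congr_mem
    intro acc c _
    exact pv_step_eq gfA_to_cf gfB_to_cf hA hB acc c
  rw [hfold]
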